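-- pv_equiv track=rewrite | github.com/userlandkernel/baseband-research | okl4_kernel/okl4_2.1.1-patch.9/tools/magpie-parsers/src/magpieparsers/cplusplus/normalise.py | normalise_type_list
-- ===== SOURCE A (Python) =====
-- def list_contains(thelist, elements):
-- 	for element in elements:
-- 		if element in thelist:
-- 			return True
-- 	return False
--
-- def normalise_type_list(name_list):
-- 	"""
-- 	Return a canonical C type name
--
-- 	We do this because many type names are synonyms in C (eg "signed long long int" and
-- 	"long long int").
--
-- 	If the type is appropriate, the function:
-- 	  * Adds "signed" or "unsigned" to the front
-- 	  * Adds "int" to the end (so "long" becomes "long int")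
-- 	  * Sorts the names in order of length
--
-- 	It thus returns the maximum-length name for any type. EG "long" becomes
-- 	"signed long int".
--
-- 	name_list is not touched.
-- 	"""
-- 	working_list = name_list[:]
-- 	new_list = []
--
-- 	if list_contains(working_list, ('long', 'short', 'signed', 'unsigned')) \
-- 			and not list_contains(working_list, ('int', 'char', '__int64')):
-- 		working_list.append('int')
--
-- 	if 'unsigned' not in working_list and 'signed' not in working_list:
-- 		working_list.insert(0, 'signed')
--
-- 	# Bail if the type isn't one we understand
-- 	order = ('signed', 'unsigned', 'long', 'short', 'int', 'char', '__int64')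
-- 	for name in order:
-- 		while name in working_list:
-- 			# Append and remove so as to correctly handle duplicated names
-- 			# such as "long long"
-- 			new_list.append(name)
-- 			working_list.remove(name)
--
-- 	if working_list:
-- 		# Still some names left - means we probably shouldn't have touched the type
-- 		return name_list
-- 	else:
-- 		return new_list
-- ===== SOURCE B (Python) =====
-- def normalise_type_list(name_list):
--     order = ('signed', 'unsigned', 'long', 'short', 'int', 'char', '__int64')
--     working_list = list(name_list)
--     if any(k in working_list for k in ('long', 'short', 'signed', 'unsigned')) \
--             and not any(k in working_list for k in ('int', 'char', '__int64')):
--         working_list.append('int')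
--     if 'unsigned' not in working_list and 'signed' not in working_list:
--         working_list = ['signed'] + working_list
--     if all(x in order for x in working_list):
--         return sorted(working_list, key=order.index)
--     return name_list
-- ===== Notes on version B (the rewrite author's own statement) =====
-- stated objective: simpler
-- what changed: Replaces the per-keyword while-remove bucket pass over a mutable working list with a single membership check followed by one stable sort keyed by the keyword's canonical rank (order.index); the bail-out case is detected up front with all() instead of by inspecting leftovers.
import Mathlib
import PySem

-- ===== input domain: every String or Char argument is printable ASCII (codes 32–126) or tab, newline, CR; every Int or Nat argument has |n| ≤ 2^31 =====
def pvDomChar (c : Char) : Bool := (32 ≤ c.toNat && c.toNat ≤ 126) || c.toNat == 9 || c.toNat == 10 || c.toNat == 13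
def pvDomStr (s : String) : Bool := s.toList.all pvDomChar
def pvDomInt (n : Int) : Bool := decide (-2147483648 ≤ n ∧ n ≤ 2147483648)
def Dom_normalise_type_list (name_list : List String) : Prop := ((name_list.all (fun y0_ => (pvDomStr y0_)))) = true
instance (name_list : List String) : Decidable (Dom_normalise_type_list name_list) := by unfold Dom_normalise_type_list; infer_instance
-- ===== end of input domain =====

-- B replaces A's per-keyword while-remove bucket pass with one membership check and a stable sort by canonical rank (simpler).

-- ===== PORT A =====
def list_contains (thelist : List String) (elements : List String) : Bool :=
  elements.any (fun element => thelist.contains element)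

-- the 'while name in working_list: new_list.append(name); working_list.remove(name)' inner loop
def pullName (name : String) (wl nl : List String) : List String × List String :=
  if h : wl.contains name then
    match hr : PySem.List.remove? wl name with
    | some wl' => pullName name wl' (nl ++ [name])
    | none => (wl, nl)
  else (wl, nl)
termination_by wl.length
decreasing_by
  have hm : name ∈ wl := by simpa using h
  rw [PySem.List.remove?_eq_some_erase wl name hm] at hr
  cases hr
  have := List.length_erase_of_mem hm
  have : wl ≠ [] := by rintro rfl; simp at hm
  have hl : 0 < wl.length := List.length_pos_iff.mpr this
  omega

def normalise_type_list (name_list : List String) : List String :=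
  let working_list := name_list
  let new_list : List String := []
  let working_list :=
    if list_contains working_list ["long", "short", "signed", "unsigned"]
        && !(list_contains working_list ["int", "char", "__int64"])
    then working_list ++ ["int"] else working_list
  let working_list :=
    if !(working_list.contains "unsigned") && !(working_list.contains "signed")
    then PySem.List.insert working_list 0 "signed" else working_list
  let order : List String := ["signed", "unsigned", "long", "short", "int", "char", "__int64"]
  let res := order.foldl (fun (p : List String × List String) name => pullName name p.1 p.2)
      (working_list, new_list)
  if res.1.isEmpty then res.2 else name_list

-- ===== PORT B =====
def normalise_type_list_alt (name_list : List String) : List String :=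
  let order : List String := ["signed", "unsigned", "long", "short", "int", "char", "__int64"]
  let working_list := name_list
  let working_list :=
    if (["long", "short", "signed", "unsigned"].any (fun k => working_list.contains k))
        && !(["int", "char", "__int64"].any (fun k => working_list.contains k))
    then working_list ++ ["int"] else working_list
  let working_list :=
    if !(working_list.contains "unsigned") && !(working_list.contains "signed")
    then "signed" :: working_list else working_list
  if working_list.all (fun x => order.contains x) then
    -- key=order.index: exact for members of order (guaranteed by the guard); idxOf = list.index there
    PySem.List.sorted working_list (fun x => (order.idxOf x : Int)) false
  else name_list

-- ===== PRECONDITION & SPEC =====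
def Spec_normalise_type_list (name_list : List String) (out : List String) : Prop := out = normalise_type_list_alt name_list
instance (name_list : List String) (out : List String) : Decidable (Spec_normalise_type_list name_list out) := by unfold Spec_normalise_type_list; infer_instance

-- ===== CLAIM (what is proved, stated in full; the proofs are below) =====
def Claim_equal_normalise_type_list : Prop := ∀ (name_list : List String), Dom_normalise_type_list name_list → Spec_normalise_type_list name_list (normalise_type_list name_list)

-- ===== LEMMAS AND PROOFS =====

theorem filter_ne_erase (a : String) (l : List String) :
    (l.erase a).filter (fun x => !(x == a)) = l.filter (fun x => !(x == a)) := by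
  induction l with
  | nil => rfl
  | cons b t ih =>
    by_cases hb : b = a
    · subst hb; simp [List.erase_cons_head]
    · rw [List.erase_cons_tail (by simpa using hb)]
      rw [List.filter_cons, List.filter_cons, ih]

theorem pullName_spec (name : String) (wl nl : List String) :
    pullName name wl nl =
      (wl.filter (fun x => !(x == name)), nl ++ List.replicate (wl.count name) name) := by
  by_cases hm : name ∈ wl
  · rw [pullName.eq_def]
    have hc : wl.contains name := by simpa using hm
    rw [dif_pos hc]
    split
    · next wl' hr =>
      have hw : wl' = wl.erase name := by
        have h2 := (PySem.List.remove?_eq_some_erase wl name hm).symm.trans hr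
        exact (Option.some_inj.mp h2).symm
      subst hw
      rw [pullName_spec name (wl.erase name) (nl ++ [name]), filter_ne_erase name wl,
        List.count_erase_self]
      have hcpos : 0 < wl.count name := List.count_pos_iff.mpr hm
      have hrep : List.replicate (wl.count name) name
          = name :: List.replicate (wl.count name - 1) name := by
        cases hc2 : wl.count name with
        | zero => rw [hc2] at hcpos; exact absurd hcpos (by simp)
        | succ k => simp [List.replicate_succ]
      rw [hrep, List.append_assoc, List.singleton_append]
    · next hr =>
      exfalso
      rw [PySem.List.remove?_eq_some_erase wl name hm] at hr
      cases hr
  · rw [pullName.eq_def]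
    have hc : ¬ wl.contains name := by simpa using hm
    rw [dif_neg hc]
    have h0 : wl.count name = 0 := List.count_eq_zero.mpr hm
    have hf : wl.filter (fun x => !(x == name)) = wl :=
      List.filter_eq_self.mpr (by intro x hx; simp; rintro rfl; exact hm hx)
    simp [h0, hf]
termination_by wl.length
decreasing_by
  have h1 := List.length_erase_of_mem hm
  have h2 : 0 < wl.length := List.length_pos_iff.mpr (by rintro rfl; simp at hm)
  omega

theorem count_filter_of_ne (l : List String) (n m : String) (h : m ≠ n) :
    (l.filter (fun x => !(x == n))).count m = l.count m := by
  induction l with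
  | nil => rfl
  | cons b t ih =>
    by_cases hb : b = n
    · subst hb
      rw [List.filter_cons]
      simp [ih, Ne.symm h]
    · rw [List.filter_cons]
      simp [hb, List.count_cons, ih]

theorem flatMap_congr_mem {α β : Type} (l : List α) (f g : α → List β)
    (h : ∀ x ∈ l, f x = g x) : l.flatMap f = l.flatMap g := by
  induction l with
  | nil => rfl
  | cons a t ih =>
    simp only [List.flatMap_cons, h a (by simp), ih (fun x hx => h x (by simp [hx]))]

theorem foldl_pull (names : List String) (hnd : names.Nodup) :
    ∀ (wl nl : List String),
      names.foldl (fun (p : List String × List String) name => pullName name p.1 p.2) (wl, nl) =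
        (wl.filter (fun x => !(names.contains x)),
         nl ++ names.flatMap (fun n => List.replicate (wl.count n) n)) := by
  induction names with
  | nil => intro wl nl; simp
  | cons n ns ih =>
    intro wl nl
    have hnmem : n ∉ ns := (List.nodup_cons.mp hnd).1
    have hnd' : ns.Nodup := (List.nodup_cons.mp hnd).2
    rw [List.foldl_cons]
    have hstep : pullName n (wl, nl).1 (wl, nl).2
        = (wl.filter (fun x => !(x == n)), nl ++ List.replicate (wl.count n) n) :=
      pullName_spec n wl nl
    rw [hstep, ih hnd']
    rw [Prod.mk.injEq]
    constructor
    · rw [List.filter_filter]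
      apply List.filter_congr
      intro x _
      by_cases hx : x = n <;> simp [hx]
    · rw [List.flatMap_cons, List.append_assoc]
      congr 2
      apply flatMap_congr_mem
      intro m hm
      rw [count_filter_of_ne wl n m]
      intro he; exact hnmem (he ▸ hm)

-- injectivity of the rank key on members of `order`
theorem idxOf_inj_on (order : List String) (x y : String)
    (hx : x ∈ order) (hy : y ∈ order) (h : order.idxOf x = order.idxOf y) : x = y := by
  have hx' : order.idxOf x < order.length := List.idxOf_lt_length_of_mem hx
  have hy' : order.idxOf y < order.length := List.idxOf_lt_length_of_mem hy
  have ex : order[order.idxOf x] = x := List.getElem_idxOf hx'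
  have ey : order[order.idxOf y] = y := List.getElem_idxOf hy'
  rw [← ex, ← ey]
  congr 1

-- uniqueness of a key-sorted permutation when the key is injective on the members
theorem sorted_unique (key : String → Int) :
    ∀ (ys zs : List String), ys.Perm zs →
      ys.Pairwise (fun a b => key a ≤ key b) → zs.Pairwise (fun a b => key a ≤ key b) →
      (∀ a ∈ ys, ∀ b ∈ ys, key a = key b → a = b) → ys = zs := by
  intro ys
  induction ys with
  | nil => intro zs hp _ _ _; exact (List.Perm.nil_eq hp)
  | cons a ys' ih =>
    intro zs hp hys hzs hinj
    cases zs with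
    | nil => exact absurd hp.symm (by simp)
    | cons b zs' =>
      have hab : a = b := by
        have hbmem : b ∈ a :: ys' := hp.mem_iff.mpr (by simp)
        have hamem : a ∈ b :: zs' := hp.mem_iff.mp (by simp)
        have h1 : key a ≤ key b := by
          rcases List.mem_cons.mp hbmem with h | h
          · rw [h]
          · exact (List.pairwise_cons.mp hys).1 b h
        have h2 : key b ≤ key a := by
          rcases List.mem_cons.mp hamem with h | h
          · rw [h]
          · exact (List.pairwise_cons.mp hzs).1 a h
        exact hinj a (by simp) b hbmem (le_antisymm h1 h2)
      subst hab
      have hp' : ys'.Perm zs' := (List.perm_cons a).mp hp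
      have := ih zs' hp' (List.pairwise_cons.mp hys).2 (List.pairwise_cons.mp hzs).2
        (fun x hx y hy h => hinj x (by simp [hx]) y (by simp [hy]) h)
      rw [this]

theorem count_flatMap_replicate (names : List String) (hnd : names.Nodup) (k : String → Nat)
    (x : String) :
    (names.flatMap (fun n => List.replicate (k n) n)).count x =
      if x ∈ names then k x else 0 := by
  induction names with
  | nil => simp
  | cons n ns ih =>
    have hnmem : n ∉ ns := (List.nodup_cons.mp hnd).1
    have ih' := ih (List.nodup_cons.mp hnd).2
    rw [List.flatMap_cons, List.count_append, ih', List.count_replicate]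
    by_cases hx : x = n
    · subst hx; simp [hnmem]
    · simp [hx, Ne.symm hx]

theorem pairwise_flatMap_replicate (names : List String) (k : String → Nat)
    (key : String → Int) (hord : names.Pairwise (fun a b => key a ≤ key b)) :
    (names.flatMap (fun n => List.replicate (k n) n)).Pairwise (fun a b => key a ≤ key b) := by
  induction names with
  | nil => simp
  | cons n ns ih =>
    rw [List.flatMap_cons, List.pairwise_append]
    refine ⟨?_, ih (List.pairwise_cons.mp hord).2, ?_⟩
    · exact List.pairwise_replicate.mpr (Or.inr le_rfl)
    · intro a ha b hb
      have ha' : a = n := (List.eq_of_mem_replicate ha)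
      rcases List.mem_flatMap.mp hb with ⟨m, hm, hbm⟩
      have hb' : b = m := List.eq_of_mem_replicate hbm
      subst ha'; subst hb'
      exact (List.pairwise_cons.mp hord).1 b hm

-- key fact: the stable sort by rank equals the canonical bucket concatenation
theorem sorted_eq_buckets (order wl : List String) (hnd : order.Nodup)
    (hord : order.Pairwise (fun a b => (order.idxOf a : Int) ≤ (order.idxOf b : Int)))
    (hall : ∀ x ∈ wl, x ∈ order) :
    PySem.List.sorted wl (fun x => (order.idxOf x : Int)) false =
      order.flatMap (fun n => List.replicate (wl.count n) n) := by
  set key : String → Int := fun x => (order.idxOf x : Int) with hkey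
  have hperm1 : (PySem.List.sorted wl key false).Perm wl := PySem.List.sorted_perm wl key false
  have hpermc : (order.flatMap (fun n => List.replicate (wl.count n) n)).Perm wl := by
    rw [List.perm_iff_count]
    intro x
    rw [count_flatMap_replicate order hnd (fun n => wl.count n) x]
    by_cases hx : x ∈ order
    · simp [hx]
    · have : wl.count x = 0 := List.count_eq_zero.mpr (fun h => hx (hall x h))
      simp [hx, this]
  apply sorted_unique key
  · exact hperm1.trans hpermc.symm
  · exact PySem.List.sorted_pairwise wl key
  · exact pairwise_flatMap_replicate order (fun n => wl.count n) key hord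
  · intro a ha b hb h
    have ha' : a ∈ wl := hperm1.mem_iff.mp ha
    have hb' : b ∈ wl := hperm1.mem_iff.mp hb
    have h' : (order.idxOf a : Int) = (order.idxOf b : Int) := by simpa [hkey] using h
    exact idxOf_inj_on order a b (hall a ha') (hall b hb') (by exact_mod_cast h')

-- ===== VERDICT (by name: the statement is the Claim_ definition above) =====
theorem normalise_type_list_spec : Claim_equal_normalise_type_list := by
  intro name_list _
  unfold Spec_normalise_type_list normalise_type_list normalise_type_list_alt list_contains
  simp only [PySem.List.insert_zero]
  set order : List String := ["signed", "unsigned", "long", "short", "int", "char", "__int64"] with horder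
  set wl1 := if (["long", "short", "signed", "unsigned"].any (fun k => name_list.contains k))
        && !(["int", "char", "__int64"].any (fun k => name_list.contains k))
    then name_list ++ ["int"] else name_list with hwl1
  set wl := if !(wl1.contains "unsigned") && !(wl1.contains "signed")
    then "signed" :: wl1 else wl1 with hwl
  have hnd : order.Nodup := by decide
  rw [foldl_pull order hnd wl []]
  simp only [List.nil_append]
  by_cases hall : ∀ x ∈ wl, x ∈ order
  · have h1 : wl.filter (fun x => !(order.contains x)) = [] := by
      rw [List.filter_eq_nil_iff]; intro x hx; simpa using hall x hx
    have h2 : wl.all (fun x => order.contains x) = true := by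
      rw [List.all_eq_true]; intro x hx; simpa using hall x hx
    rw [h1, h2]
    simp only [List.isEmpty_nil, if_pos]
    rw [sorted_eq_buckets order wl hnd (by decide) hall]
  · rcases not_forall.mp hall with ⟨x, hx'⟩
    rw [Classical.not_imp] at hx'
    have h2 : wl.all (fun x => order.contains x) = false := by
      rw [List.all_eq_false]
      exact ⟨x, hx'.1, by simpa using hx'.2⟩
    have h1 : wl.filter (fun x => !(order.contains x)) ≠ [] := by
      intro he
      have := List.filter_eq_nil_iff.mp he x hx'.1
      simp at this
      exact hx'.2 this
    have hie : (wl.filter (fun x => !(order.contains x))).isEmpty = false := by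
      cases hh : (wl.filter (fun x => !(order.contains x))).isEmpty
      · rfl
      · exact absurd (List.isEmpty_iff.mp hh) h1
    rw [h2, hie]
    simp
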